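-- pv_equiv track=rewrite | github.com/Jeanpseven/TheCipher | script.py | cifra_vigenere_codificar
-- ===== SOURCE A (Python) =====
-- def cifra_vigenere_codificar(texto, chave):
--     texto = texto.upper()
--     chave = chave.upper()
--     resultado = ""
--     chave_idx = 0
--     for letra in texto:
--         if letra.isalpha():
--             if letra.islower():
--                 indice_letra = ord(letra) - ord("a")
--                 indice_chave = ord(chave[chave_idx]) - ord("A")
--                 indice_codificado = (indice_letra + indice_chave) % 26
--                 letra_codificada = chr(indice_codificado + ord("A")).lower()
--                 resultado += letra_codificada
--             else:
--                 indice_letra = ord(letra) - ord("A")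
--                 indice_chave = ord(chave[chave_idx]) - ord("A")
--                 indice_codificado = (indice_letra + indice_chave) % 26
--                 letra_codificada = chr(indice_codificado + ord("A"))
--                 resultado += letra_codificada
--             chave_idx = (chave_idx + 1) % len(chave)
--         else:
--             resultado += letra
--     return resultado
-- ===== SOURCE B (Python) =====
-- def cifra_vigenere_codificar(texto, chave):
--     texto = texto.upper()
--     chave = chave.upper()
--     codificadas = []
--     count = 0
--     for letra in texto:
--         if letra.isalpha():
--             shift = ord(chave[count % len(chave)]) - ord("A")
--             codificadas.append(chr((ord(letra) - ord("A") + shift) % 26 + ord("A")))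
--             count += 1
--     saida = []
--     it = iter(codificadas)
--     for letra in texto:
--         saida.append(next(it) if letra.isalpha() else letra)
--     return "".join(saida)
-- ===== Notes on version B (the rewrite author's own statement) =====
-- stated objective: alternative
-- what changed: Replaced A's single interleaved loop with a mutable key index and string concatenation by a two-pass scheme: a first pass collects the encoded letters for alphabetic positions using count % len(chave) directly, a second pass merges them back with the non-alphabetic characters via an iterator and a join.
import Mathlib
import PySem

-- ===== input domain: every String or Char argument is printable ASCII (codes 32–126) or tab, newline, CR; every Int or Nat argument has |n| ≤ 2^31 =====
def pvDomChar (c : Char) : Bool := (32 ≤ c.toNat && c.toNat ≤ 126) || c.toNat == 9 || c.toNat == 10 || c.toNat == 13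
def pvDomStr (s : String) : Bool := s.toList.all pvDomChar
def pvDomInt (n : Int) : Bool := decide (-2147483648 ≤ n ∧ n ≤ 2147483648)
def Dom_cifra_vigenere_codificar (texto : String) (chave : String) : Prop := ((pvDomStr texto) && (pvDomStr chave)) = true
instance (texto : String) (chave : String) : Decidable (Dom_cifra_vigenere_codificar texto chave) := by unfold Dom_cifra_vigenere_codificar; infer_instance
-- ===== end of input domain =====

-- B replaces A's single interleaved loop (mutable key index, string +=) by a two-pass scheme:
-- encode the alphabetic letters first, then merge them back over the text; return values agree on Pre_.


-- ===== PORT A =====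
-- the for-loop of A: state (resultado, chave_idx), one step per character of texto;
-- chave[chave_idx] is PySem.List.pyGet?; `.getD 'A'` only totalizes the IndexError case, which Pre_ excludes
def pvALoop (chave : List Char) : List Char → List Char → Nat → List Char
  | [], res, _ => res
  | letra :: rest, res, idx =>
    if PySem.Chars.isalpha letra then
      if PySem.Chars.islower letra then
        let indice_letra : Int := (letra.toNat : Int) - 97
        let indice_chave : Int := (((PySem.List.pyGet? chave (idx : Int)).getD 'A').toNat : Int) - 65
        let indice_codificado : Int := PySem.Int.mod (indice_letra + indice_chave) 26
        let letra_codificada : Char := PySem.Chars.lowerChar (Char.ofNat (indice_codificado + 65).toNat)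
        pvALoop chave rest (res ++ [letra_codificada]) ((idx + 1) % chave.length)
      else
        let indice_letra : Int := (letra.toNat : Int) - 65
        let indice_chave : Int := (((PySem.List.pyGet? chave (idx : Int)).getD 'A').toNat : Int) - 65
        let indice_codificado : Int := PySem.Int.mod (indice_letra + indice_chave) 26
        let letra_codificada : Char := Char.ofNat (indice_codificado + 65).toNat
        pvALoop chave rest (res ++ [letra_codificada]) ((idx + 1) % chave.length)
    else pvALoop chave rest (res ++ [letra]) idx

def cifra_vigenere_codificar (texto : String) (chave : String) : String :=
  String.ofList (pvALoop (PySem.Chars.upper chave.toList) (PySem.Chars.upper texto.toList) [] 0)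

-- ===== PORT B =====
-- first pass of B: the encoded letters of the alphabetic positions; count counts alpha chars seen
def pvBPass1 (chave : List Char) : List Char → Nat → List Char
  | [], _ => []
  | letra :: rest, count =>
    if PySem.Chars.isalpha letra then
      let shift : Int := (((PySem.List.pyGet? chave ((count % chave.length : Nat) : Int)).getD 'A').toNat : Int) - 65
      Char.ofNat (PySem.Int.mod ((letra.toNat : Int) - 65 + shift) 26 + 65).toNat :: pvBPass1 chave rest (count + 1)
    else pvBPass1 chave rest count

-- second pass of B: merge the encoded letters back with the non-alphabetic characters
def pvBPass2 : List Char → List Char → List Char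
  | [], _ => []
  | letra :: rest, encs =>
    if PySem.Chars.isalpha letra then encs.headD letra :: pvBPass2 rest encs.tail
    else letra :: pvBPass2 rest encs

def cifra_vigenere_codificar_alt (texto : String) (chave : String) : String :=
  let t := PySem.Chars.upper texto.toList
  let k := PySem.Chars.upper chave.toList
  String.ofList (pvBPass2 t (pvBPass1 k t 0))

-- ===== PRECONDITION & SPEC =====
-- Pre_ excludes only the inputs where Python A raises: an empty key together with at least one
-- alphabetic character in texto (IndexError on chave[chave_idx]; B raises ZeroDivisionError there).
def Pre_cifra_vigenere_codificar (texto : String) (chave : String) : Prop :=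
  chave ≠ "" ∨ texto.toList.all (fun c => !(PySem.Chars.isalpha c)) = true
instance (texto : String) (chave : String) : Decidable (Pre_cifra_vigenere_codificar texto chave) := by unfold Pre_cifra_vigenere_codificar; infer_instance
def pvWitness_cifra_vigenere_codificar : String × String := ("Attack at Dawn!", "Lemon")

def Spec_cifra_vigenere_codificar (texto : String) (chave : String) (out : String) : Prop := out = cifra_vigenere_codificar_alt texto chave
instance (texto : String) (chave : String) (out : String) : Decidable (Spec_cifra_vigenere_codificar texto chave out) := by unfold Spec_cifra_vigenere_codificar; infer_instance

-- ===== CLAIM (what is proved, stated in full; the proofs are below) =====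
def Claim_equal_cifra_vigenere_codificar : Prop := ∀ (texto : String) (chave : String), Dom_cifra_vigenere_codificar texto chave → Pre_cifra_vigenere_codificar texto chave → Spec_cifra_vigenere_codificar texto chave (cifra_vigenere_codificar texto chave)

-- ===== LEMMAS AND PROOFS =====

lemma pv_toNat_ofNat (n : Nat) (h : n < 0xd800) : (Char.ofNat n).toNat = n := by
  simp [Char.ofNat, Nat.isValidChar, h]

lemma pv_islower_iff (c : Char) : PySem.Chars.islower c = true ↔ (97 ≤ c.toNat ∧ c.toNat ≤ 122) := by
  simp [PySem.Chars.islower, Char.le_def, UInt32.le_iff_toNat_le]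

-- after .upper() no character is lowercase, so A's islower branch is dead
lemma pv_islower_upperChar (c : Char) : PySem.Chars.islower (PySem.Chars.upperChar c) = false := by
  by_cases hl : PySem.Chars.islower c = true
  · have hb := (pv_islower_iff c).mp hl
    simp only [PySem.Chars.upperChar, hl, if_true]
    rw [← Bool.not_eq_true]
    intro hcon
    have := (pv_islower_iff _).mp hcon
    rw [pv_toNat_ofNat _ (by omega)] at this
    omega
  · simp only [PySem.Chars.upperChar, hl]
    simpa using hl

-- main invariant: A's loop at key index count % len(chave) equals res ++ B's two passes from count
lemma pv_main (chave : List Char) :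
    ∀ (chars : List Char) (res : List Char) (count : Nat),
      (∀ c ∈ chars, PySem.Chars.islower c = false) →
      pvALoop chave chars res (count % chave.length) =
        res ++ pvBPass2 chars (pvBPass1 chave chars count) := by
  intro chars
  induction chars with
  | nil => intro res count _; simp [pvALoop, pvBPass1, pvBPass2]
  | cons letra rest ih =>
    intro res count h
    have hlow : PySem.Chars.islower letra = false := h letra (List.mem_cons_self ..)
    have hrest : ∀ c ∈ rest, PySem.Chars.islower c = false := fun c hc => h c (List.mem_cons_of_mem _ hc)
    by_cases ha : PySem.Chars.isalpha letra = true
    · simp only [pvALoop, pvBPass1, pvBPass2, ha, hlow, if_true, if_false, Bool.false_eq_true,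
        List.headD_cons, List.tail_cons]
      have hmod : (count % chave.length + 1) % chave.length = (count + 1) % chave.length := by
        conv_rhs => rw [Nat.add_mod]
        rw [Nat.add_mod (count % chave.length) 1, Nat.mod_mod_of_dvd count (dvd_refl _)]
      rw [hmod, ih (res ++ [_]) (count + 1) hrest]
      simp
    · simp only [pvALoop, pvBPass1, pvBPass2, ha, if_false, Bool.false_eq_true]
      rw [ih (res ++ [letra]) count hrest]
      simp

-- ===== VERDICT (by name: the statement is the Claim_ definition above) =====
theorem cifra_vigenere_codificar_spec : Claim_equal_cifra_vigenere_codificar := by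
  intro texto chave _hdom _hpre
  unfold Spec_cifra_vigenere_codificar cifra_vigenere_codificar cifra_vigenere_codificar_alt
  have h : ∀ c ∈ PySem.Chars.upper texto.toList, PySem.Chars.islower c = false := by
    intro c hc
    simp only [PySem.Chars.upper, List.mem_map] at hc
    obtain ⟨x, -, rfl⟩ := hc
    exact pv_islower_upperChar x
  have hm := pv_main (PySem.Chars.upper chave.toList) (PySem.Chars.upper texto.toList) [] 0 h
  rw [Nat.zero_mod] at hm
  rw [hm]
  simp
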